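-- pv_equiv track=rewrite | github.com/cahalvaro/Examen_final | P1_Automata_finito.py | es_identificador
-- ===== SOURCE A (Python) =====
-- from enum import Enum
--
-- class Estados(Enum):
--     Q0 = 0
--     Q1 = 1
--     Q2 = 2
--     Q3 = 3
--
-- def es_identificador(source):
--     estado_actual = Estados.Q0
--     for c in source:
--         if estado_actual == Estados.Q0:
--             if c == 'm':
--                 estado_actual = Estados.Q1
--             elif c == 'h':
--                 estado_actual = Estados.Q2
--             else:
--                 return False
--         elif estado_actual == Estados.Q1:
--             if c == 'a':
--                 estado_actual = Estados.Q2
--             elif c == 'h':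
--                 estado_actual = Estados.Q3
--             else:
--                 return False
--         elif estado_actual == Estados.Q2:
--             if c == 'm':
--                 estado_actual = Estados.Q1
--             else:
--                 return False
--         elif estado_actual == Estados.Q3:
--             if c == 'a':
--                 estado_actual = Estados.Q3
--             else:
--                 return False
--     return estado_actual in (Estados.Q3, Estados.Q2)
-- ===== SOURCE B (Python) =====
-- _T = {
--     (0, 'm'): 1, (0, 'h'): 2,
--     (1, 'a'): 2, (1, 'h'): 3,
--     (2, 'm'): 1,
--     (3, 'a'): 3,
-- }
--
-- def es_identificador(source):
--     # Backward co-reachability: scan the string right-to-left maintaining the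
--     # set of states from which the remaining suffix is accepted; accept iff
--     # the start state 0 ends up in that set.
--     live = {2, 3}
--     for c in reversed(source):
--         live = {s for s in range(4) if _T.get((s, c)) in live}
--     return 0 in live
-- ===== Notes on version B (the rewrite author's own statement) =====
-- stated objective: alternative
-- what changed: Instead of running the DFA forward with a single current state and early returns, B scans the string right-to-left computing backward co-reachability: the set of states from which the remaining suffix is accepted (driven by a transition table), accepting iff the start state is in the final set.
import Mathlib
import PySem

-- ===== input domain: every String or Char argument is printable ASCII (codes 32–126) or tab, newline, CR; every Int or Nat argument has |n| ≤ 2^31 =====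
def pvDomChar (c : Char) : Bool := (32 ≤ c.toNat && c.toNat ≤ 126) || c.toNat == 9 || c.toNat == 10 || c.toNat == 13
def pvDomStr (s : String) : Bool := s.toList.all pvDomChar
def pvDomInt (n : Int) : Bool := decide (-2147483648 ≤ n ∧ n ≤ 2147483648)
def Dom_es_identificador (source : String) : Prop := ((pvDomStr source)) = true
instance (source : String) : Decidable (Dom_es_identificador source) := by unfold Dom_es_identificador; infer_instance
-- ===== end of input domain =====

-- B replaces A's forward single-state DFA run by backward co-reachability:
-- it scans the string right-to-left maintaining the SET of states from which
-- the remaining suffix is accepted, and accepts iff the start state survives.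
-- ===== PORT A =====
inductive EstadosA where
  | Q0 | Q1 | Q2 | Q3
deriving DecidableEq, Repr

-- the for-loop of A: early 'return False' becomes returning false from the recursion
def esGoA : EstadosA → List Char → Bool
  | st, [] => st == EstadosA.Q3 || st == EstadosA.Q2
  | EstadosA.Q0, c :: rest =>
      if c = 'm' then esGoA EstadosA.Q1 rest
      else if c = 'h' then esGoA EstadosA.Q2 rest
      else false
  | EstadosA.Q1, c :: rest =>
      if c = 'a' then esGoA EstadosA.Q2 rest
      else if c = 'h' then esGoA EstadosA.Q3 rest
      else false
  | EstadosA.Q2, c :: rest =>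
      if c = 'm' then esGoA EstadosA.Q1 rest
      else false
  | EstadosA.Q3, c :: rest =>
      if c = 'a' then esGoA EstadosA.Q3 rest
      else false

def es_identificador (source : String) : Bool :=
  esGoA EstadosA.Q0 source.toList

-- ===== PORT B =====
-- _T of Source B
def esTableB : PySem.Dict (Int × Char) Int :=
  PySem.Dict.ofList
    [((0, 'm'), 1), ((0, 'h'), 2),
     ((1, 'a'), 2), ((1, 'h'), 3),
     ((2, 'm'), 1),
     ((3, 'a'), 3)]

-- the loop body of Source B: {s for s in range(4) if _T.get((s, c)) in live}
-- ('None in live' is False, hence the match on the optional lookup)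
def esStepB (live : PySem.Set Int) (c : Char) : PySem.Set Int :=
  PySem.Set.ofList ((PySem.List.pyRange 0 4 1).filter (fun s =>
    match esTableB.get? (s, c) with
    | none => false
    | some t => PySem.Set.contains live t))

-- the loop of Source B: for c in reversed(source), then '0 in live'
def es_identificador_alt (source : String) : Bool :=
  PySem.Set.contains (source.toList.reverse.foldl esStepB (PySem.Set.ofList [2, 3])) 0

-- ===== PRECONDITION & SPEC =====
def Spec_es_identificador (source : String) (out : Bool) : Prop := out = es_identificador_alt source
instance (source : String) (out : Bool) : Decidable (Spec_es_identificador source out) := by unfold Spec_es_identificador; infer_instance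

-- ===== CLAIM (what is proved, stated in full; the proofs are below) =====
def Claim_equal_es_identificador : Prop := ∀ (source : String), Dom_es_identificador source → Spec_es_identificador source (es_identificador source)

-- ===== LEMMAS AND PROOFS =====
def encA : EstadosA → Int
  | EstadosA.Q0 => 0
  | EstadosA.Q1 => 1
  | EstadosA.Q2 => 2
  | EstadosA.Q3 => 3

theorem esTableB_get (st : Int) (c : Char) :
    esTableB.get? (st, c) =
      if 0 = st ∧ 'm' = c then some 1
      else if 0 = st ∧ 'h' = c then some 2
      else if 1 = st ∧ 'a' = c then some 2
      else if 1 = st ∧ 'h' = c then some 3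
      else if 2 = st ∧ 'm' = c then some 1
      else if 3 = st ∧ 'a' = c then some 3
      else none := by
  have : esTableB = PySem.Dict.mk
      [((0, 'm'), 1), ((0, 'h'), 2), ((1, 'a'), 2), ((1, 'h'), 3), ((2, 'm'), 1), ((3, 'a'), 3)] := by
    decide
  rw [this]
  simp only [PySem.Dict.get?_mk_cons, beq_iff_eq, Prod.mk.injEq]
  simp [PySem.Dict.get?]

theorem contains_stepB (live : PySem.Set Int) (c : Char) (s : Int)
    (hs : s ∈ PySem.List.pyRange 0 4 1) :
    PySem.Set.contains (esStepB live c) s =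
      (match esTableB.get? (s, c) with
       | none => false
       | some t => PySem.Set.contains live t) := by
  unfold esStepB
  cases hg : esTableB.get? (s, c) with
  | none => simp [PySem.Set.contains, PySem.Set.mem_ofList, List.mem_filter, hg]
  | some t =>
    by_cases h : t ∈ live
    · simp [PySem.Set.contains, PySem.Set.mem_ofList, List.mem_filter, hs, hg, h]
    · simp [PySem.Set.contains, PySem.Set.mem_ofList, List.mem_filter, hg, h]

theorem esGo_agree (xs : List Char) :
    ∀ st : EstadosA,
      esGoA st xs = PySem.Set.contains (xs.reverse.foldl esStepB (PySem.Set.ofList [2, 3])) (encA st) := by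
  induction xs with
  | nil => intro st; cases st <;> decide
  | cons c rest ih =>
    intro st
    have hrun : (c :: rest).reverse.foldl esStepB (PySem.Set.ofList [2, 3]) =
        esStepB (rest.reverse.foldl esStepB (PySem.Set.ofList [2, 3])) c := by
      simp [List.foldl_append]
    rw [hrun, contains_stepB _ _ _ (by cases st <;> decide), esTableB_get]
    cases st <;>
      simp only [esGoA, encA] <;>
      by_cases hm : c = 'm' <;> by_cases ha : c = 'a' <;> by_cases hh : c = 'h' <;>
      simp_all [encA, eq_comm]

-- ===== VERDICT (by name: the statement is the Claim_ definition above) =====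
theorem es_identificador_spec : Claim_equal_es_identificador := by
  intro source _
  unfold Spec_es_identificador es_identificador es_identificador_alt
  exact esGo_agree source.toList EstadosA.Q0
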